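-- pv_equiv track=rewrite | github.com/lautaro-b/recursion_hanoi | ex7.py | no_rep_sequences_with_prefix
-- ===== SOURCE A (Python) =====
-- def no_rep_sequences_with_prefix(prefix, char_list, n, my_list):
--     """Returns a list with all the possible sequences of the characters in
--     char_list of length n with no repetitions starting with the given prefix"""
--     type(my_list) == list
--     # The 'recursive equivalent' for creating an empty list in the beginning,
--     # if i would create an empty list, the recursion will not fill it
--     # on every round
--     if n == 0:
--         my_list.append(prefix)
--     else:
--         for char in char_list:
--             if char not in prefix:
--                 no_rep_sequences_with_prefix(prefix + char, char_list, n - 1,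
--                                              my_list)
--     return my_list
-- ===== SOURCE B (Python) =====
-- def no_rep_sequences_with_prefix(prefix, char_list, n, my_list):
--     """Breadth-first level expansion instead of DFS recursion: extend the
--     current level of partial sequences n times (stopping early once no
--     sequence can be extended), then append the final level to my_list (same
--     order as the DFS leaves); mutates and returns my_list."""
--     level = [prefix] if n >= 0 else []
--     for _ in range(n):
--         if not level:
--             break
--         level = [p + c for p in level for c in char_list if c not in p]
--     my_list.extend(level)
--     return my_list
-- ===== Notes on version B (the rewrite author's own statement) =====
-- stated objective: alternative
-- what changed: Replaces A's depth-first recursion by an iterative breadth-first level expansion: the list of partial sequences is extended n times by one character each round, and the final level is appended to my_list; the nested-comprehension order reproduces A's DFS leaf order.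
import Mathlib
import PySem

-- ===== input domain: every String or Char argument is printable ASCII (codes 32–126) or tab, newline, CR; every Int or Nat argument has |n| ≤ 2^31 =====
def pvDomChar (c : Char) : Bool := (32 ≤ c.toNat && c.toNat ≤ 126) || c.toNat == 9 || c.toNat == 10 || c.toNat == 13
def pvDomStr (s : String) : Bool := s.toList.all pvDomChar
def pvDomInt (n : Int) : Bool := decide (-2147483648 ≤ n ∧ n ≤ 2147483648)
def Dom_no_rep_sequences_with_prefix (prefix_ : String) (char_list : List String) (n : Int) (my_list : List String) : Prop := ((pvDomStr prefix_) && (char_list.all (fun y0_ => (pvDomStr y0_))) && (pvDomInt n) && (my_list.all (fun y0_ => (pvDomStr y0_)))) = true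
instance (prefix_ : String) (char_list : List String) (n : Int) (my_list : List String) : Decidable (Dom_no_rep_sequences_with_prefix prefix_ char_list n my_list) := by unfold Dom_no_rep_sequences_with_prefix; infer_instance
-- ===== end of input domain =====

-- B replaces A's depth-first recursion by an iterative breadth-first level expansion
-- (objective: alternative, no speed claim). Both Pythons mutate my_list in place and
-- return it; the equivalence proved here is about the return value.

-- ===== PORT A =====
-- helpers below are needed only for the termination measure of the port of A:
-- availN counts the char_list entries not yet contained in the prefix.
def availN (char_list : List String) (p : String) : Nat :=
  char_list.countP (fun c => !(PySem.Str.isIn c p))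

theorem isIn_append_left (x p c : String) (h : PySem.Str.isIn x p = true) :
    PySem.Str.isIn x (p ++ c) = true := by
  rw [PySem.Str.isIn_iff_infix] at h ⊢
  rw [String.toList_append]
  obtain ⟨s, t, hst⟩ := h
  exact ⟨s, t ++ c.toList, by simp [← hst]⟩

theorem isIn_append_false (x p c : String) (h : PySem.Str.isIn x (p ++ c) = false) :
    PySem.Str.isIn x p = false := by
  cases hp : PySem.Str.isIn x p
  · rfl
  · rw [isIn_append_left x p c hp] at h; exact h

theorem isIn_self_append (p c : String) : PySem.Str.isIn c (p ++ c) = true := by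
  rw [PySem.Str.isIn_iff_infix, String.toList_append]
  exact List.IsSuffix.isInfix ⟨p.toList, rfl⟩

theorem availN_append_lt (cl : List String) (p c : String) (hm : c ∈ cl)
    (hni : PySem.Str.isIn c p = false) : availN cl (p ++ c) < availN cl p := by
  obtain ⟨s, t, rfl⟩ := List.append_of_mem hm
  have h1 : availN s (p ++ c) ≤ availN s p := by
    apply List.countP_mono_left
    intro x _ hx
    simp only [Bool.not_eq_eq_eq_not, Bool.not_true] at hx ⊢
    exact isIn_append_false x p c hx
  have h2 : availN t (p ++ c) ≤ availN t p := by
    apply List.countP_mono_left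
    intro x _ hx
    simp only [Bool.not_eq_eq_eq_not, Bool.not_true] at hx ⊢
    exact isIn_append_false x p c hx
  simp only [availN, List.countP_append, List.countP_cons, isIn_self_append, hni,
    Bool.not_true, Bool.not_false, Bool.false_eq_true, if_true, if_false] at *
  omega

-- the recursion is on the Python code; Python's `char in prefix` is PySem.Str.isIn
def no_rep_sequences_with_prefix (prefix_ : String) (char_list : List String) (n : Int) (my_list : List String) : List String :=
  if n = 0 then
    my_list ++ [prefix_]
  else
    char_list.foldl (fun acc char =>
      if PySem.Str.isIn char prefix_ = false then
        no_rep_sequences_with_prefix (prefix_ ++ char) char_list (n - 1) acc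
      else acc) my_list
termination_by availN char_list prefix_
decreasing_by
  rename_i hmem h
  exact availN_append_lt char_list prefix_ char hmem h

-- ===== PORT B =====
-- one round of Source B's comprehension: [p + c for p in level for c in char_list if c not in p]
def bfsExpand (char_list : List String) (level : List String) : List String :=
  level.flatMap (fun p =>
    (char_list.filter (fun c => !(PySem.Str.isIn c p))).map (fun c => p ++ c))

-- Source B's 'for _ in range(n)' loop, on the non-negative round count, with Source B's
-- early break once the level is empty
def bfsIter (char_list : List String) : Nat → List String → List String
  | 0, level => level
  | Nat.succ k, level =>
    if level.isEmpty then level else bfsIter char_list k (bfsExpand char_list level)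

def no_rep_sequences_with_prefix_alt (prefix_ : String) (char_list : List String) (n : Int) (my_list : List String) : List String :=
  my_list ++ bfsIter char_list n.toNat (if 0 ≤ n then [prefix_] else [])

-- ===== PRECONDITION & SPEC =====
def Spec_no_rep_sequences_with_prefix (prefix_ : String) (char_list : List String) (n : Int) (my_list : List String) (out : List String) : Prop := out = no_rep_sequences_with_prefix_alt prefix_ char_list n my_list
instance (prefix_ : String) (char_list : List String) (n : Int) (my_list : List String) (out : List String) : Decidable (Spec_no_rep_sequences_with_prefix prefix_ char_list n my_list out) := by unfold Spec_no_rep_sequences_with_prefix; infer_instance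

-- ===== CLAIM =====
def Claim_equal_no_rep_sequences_with_prefix : Prop := ∀ (prefix_ : String) (char_list : List String) (n : Int) (my_list : List String), Dom_no_rep_sequences_with_prefix prefix_ char_list n my_list → Spec_no_rep_sequences_with_prefix prefix_ char_list n my_list (no_rep_sequences_with_prefix prefix_ char_list n my_list)

-- ===== LEMMAS AND PROOFS =====
theorem A_zero (p : String) (cl : List String) (out : List String) :
    no_rep_sequences_with_prefix p cl 0 out = out ++ [p] := by
  rw [no_rep_sequences_with_prefix]; simp

theorem A_step (p : String) (cl : List String) (k : Int) (out : List String) (hk : k ≠ 0) :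
    no_rep_sequences_with_prefix p cl k out
      = (cl.filter (fun c => !(PySem.Str.isIn c p))).foldl
          (fun acc c => no_rep_sequences_with_prefix (p ++ c) cl (k - 1) acc) out := by
  rw [no_rep_sequences_with_prefix, if_neg hk, List.foldl_filter]
  apply PySem.List.foldl_congr_mem
  intro acc c _
  simp

-- A leaves my_list untouched when n is negative (n == 0 is never reached)
theorem A_neg (cl : List String) (m : Nat) (p : String) (k : Int) (out : List String)
    (hm : availN cl p ≤ m) (hk : k < 0) :
    no_rep_sequences_with_prefix p cl k out = out := by
  induction m generalizing p k out with
  | zero =>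
    rw [A_step p cl k out (by omega)]
    have : cl.filter (fun c => !(PySem.Str.isIn c p)) = [] := by
      rw [List.filter_eq_nil_iff]
      intro c hc
      by_contra hne
      have : 0 < availN cl p := List.countP_pos_iff.mpr ⟨c, hc, by simpa using hne⟩
      omega
    rw [this]; rfl
  | succ m ih =>
    rw [A_step p cl k out (by omega)]
    have : ∀ acc : List String, ∀ c ∈ cl.filter (fun c => !(PySem.Str.isIn c p)),
        no_rep_sequences_with_prefix (p ++ c) cl (k - 1) acc = acc := by
      intro acc c hc
      have hcm := List.mem_filter.mp hc
      have hlt := availN_append_lt cl p c hcm.1 (by simpa using hcm.2)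
      exact ih (p ++ c) (k - 1) acc (by omega) (by omega)
    refine (PySem.List.foldl_congr_mem _ _ (fun acc _ => acc) _ this).trans ?_
    exact List.foldl_fixed' (fun _ => rfl) _

-- proof-side helper: the level iteration without the early break
def bfsPure (char_list : List String) : Nat → List String → List String
  | 0, level => level
  | Nat.succ k, level => bfsPure char_list k (bfsExpand char_list level)

theorem bfsExpand_append (cl : List String) (l1 l2 : List String) :
    bfsExpand cl (l1 ++ l2) = bfsExpand cl l1 ++ bfsExpand cl l2 := by
  simp [bfsExpand]

theorem bfsPure_append (cl : List String) (k : Nat) (l1 l2 : List String) :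
    bfsPure cl k (l1 ++ l2) = bfsPure cl k l1 ++ bfsPure cl k l2 := by
  induction k generalizing l1 l2 with
  | zero => rfl
  | succ k ih => simp [bfsPure, bfsExpand_append, ih]

theorem bfsPure_nil (cl : List String) (k : Nat) : bfsPure cl k [] = [] := by
  induction k with
  | zero => rfl
  | succ k ih => simpa [bfsPure, bfsExpand] using ih

theorem bfsPure_flatMap (cl : List String) (k : Nat) (l : List String) :
    bfsPure cl k l = l.flatMap (fun q => bfsPure cl k [q]) := by
  induction l with
  | nil => exact bfsPure_nil cl k
  | cons a t ih =>
    have := bfsPure_append cl k [a] t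
    simpa [ih] using this

-- A's DFS leaves in left-to-right order are exactly the k-fold level expansion
theorem A_eq_bfs (cl : List String) (k : Nat) (p : String) (out : List String) :
    no_rep_sequences_with_prefix p cl (k : Int) out = out ++ bfsPure cl k [p] := by
  induction k generalizing p out with
  | zero => simpa [bfsPure] using A_zero p cl out
  | succ k ih =>
    rw [A_step p cl (k + 1 : Nat) out (by omega)]
    have hstep : ((k + 1 : Nat) : Int) - 1 = (k : Int) := by push_cast; ring
    rw [hstep]
    have hfold : ∀ acc : List String, ∀ c ∈ cl.filter (fun c => !(PySem.Str.isIn c p)),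
        no_rep_sequences_with_prefix (p ++ c) cl (k : Int) acc = acc ++ bfsPure cl k [p ++ c] :=
      fun acc c _ => ih (p ++ c) acc
    rw [PySem.List.foldl_congr_mem _ _ (fun acc c => acc ++ bfsPure cl k [p ++ c]) _ hfold]
    rw [PySem.List.foldl_append_eq_flatMap]
    congr 1
    show _ = bfsPure cl k (bfsExpand cl [p])
    rw [bfsPure_flatMap cl k (bfsExpand cl [p])]
    simp [bfsExpand, List.flatMap_map]

-- the break fires only on an empty level, which the pure iteration preserves
theorem bfsIter_eq_pure (cl : List String) (k : Nat) (l : List String) :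
    bfsIter cl k l = bfsPure cl k l := by
  induction k generalizing l with
  | zero => rfl
  | succ k ih =>
    by_cases h : l.isEmpty
    · rw [List.isEmpty_iff] at h
      subst h
      simp [bfsIter, bfsPure, bfsExpand, bfsPure_nil]
    · simp only [bfsIter, bfsPure, h, if_false]
      exact ih _

-- ===== VERDICT =====
theorem no_rep_sequences_with_prefix_spec : Claim_equal_no_rep_sequences_with_prefix := by
  intro prefix_ char_list n my_list _
  unfold Spec_no_rep_sequences_with_prefix no_rep_sequences_with_prefix_alt
  by_cases hn : 0 ≤ n
  · rw [if_pos hn]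
    obtain ⟨k, rfl⟩ := Int.eq_ofNat_of_zero_le hn
    rw [Int.toNat_natCast, A_eq_bfs, bfsIter_eq_pure]
  · rw [if_neg hn, bfsIter_eq_pure, bfsPure_nil, List.append_nil]
    exact A_neg char_list (availN char_list prefix_) prefix_ n my_list le_rfl (by omega)
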